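-- pv_equiv track=rewrite | github.com/xg416/MambaTM | code/test_MambaTM_dynamic.py | split_to_patches
-- ===== SOURCE A (Python) =====
-- def split_to_patches(h, w, s):
--     nh = h // s + 1
--     nw = w // s + 1
--     if nh > 1:
--         ol_h = int((nh * s - h) / (nh - 1))
--         h_start = 0
--         hpos = [h_start]
--         for i in range(1, nh):
--             h_start = hpos[-1] + s - ol_h
--             if h_start+s > h:
--                 h_start = h-s
--             hpos.append(h_start)
--         if len(hpos)==2 and hpos[0] == hpos[1]:
--             hpos = [hpos[0]]
--     else:
--         hpos = [0]
--     if nw > 1: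
--         ol_w = int((nw * s - w) / (nw - 1))
--         w_start = 0
--         wpos = [w_start]
--         for i in range(1, nw):
--             w_start = wpos[-1] + s - ol_w
--             if w_start+s > w:
--                 w_start = w-s
--             wpos.append(w_start)
--         if len(wpos)==2 and wpos[0] == wpos[1]:
--             wpos = [wpos[0]]
--     else:
--         wpos = [0]
--     return hpos, wpos
-- ===== SOURCE B (Python) =====
-- def _positions(dim, s):
--     n = dim // s + 1
--     if n <= 1:
--         return [0]
--     step = s - (n * s - dim) // (n - 1)
--     pos = [0] + [min(i * step, dim - s) for i in range(1, n)]
--     if len(pos) == 2 and pos[0] == pos[1]: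
--         pos = [pos[0]]
--     return pos
--
-- def split_to_patches(h, w, s):
--     return _positions(h, s), _positions(w, s)
-- ===== Notes on version B (the rewrite author's own statement) =====
-- stated objective: simpler
-- what changed: Replaces the incremental last-element recurrence with clamp-to-(dim-s) by a closed-form per-index computation pos[i] = min(i*step, dim - s), factored into one shared helper per dimension.
-- outside the precondition, e.g. on split_to_patches(-5, -5, -2): A returns ([0, -3, -5], [0, -3, -5]), B returns ([0, -3, -3], [0, -3, -3]); on split_to_patches(4, 4, 0): A raises ZeroDivisionError, B raises ZeroDivisionError
import Mathlib
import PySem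

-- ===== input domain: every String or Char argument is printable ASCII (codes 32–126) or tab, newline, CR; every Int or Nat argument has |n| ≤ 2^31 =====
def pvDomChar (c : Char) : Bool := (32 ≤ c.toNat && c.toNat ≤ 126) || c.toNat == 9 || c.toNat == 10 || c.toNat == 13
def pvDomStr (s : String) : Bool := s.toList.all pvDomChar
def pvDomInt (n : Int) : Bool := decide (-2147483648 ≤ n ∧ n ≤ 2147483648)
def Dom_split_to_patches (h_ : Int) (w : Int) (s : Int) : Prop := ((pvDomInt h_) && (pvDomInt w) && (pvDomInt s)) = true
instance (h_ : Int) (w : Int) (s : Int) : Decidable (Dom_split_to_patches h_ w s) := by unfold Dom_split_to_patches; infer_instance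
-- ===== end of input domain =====

-- B computes each start position by the closed form min(i*step, dim-s) instead of A's
-- clamped last-element recurrence; objective: simpler.

-- ===== PORT A =====
-- body of A's `for i in range(1, n)` loop: read pos[-1], step forward, clamp, append
def pvBodyA (dim s ol : Int) (acc : List Int) (_i : Int) : List Int :=
  let st := PySem.List.pyGetD acc (-1) 0 + s - ol
  let st := if st + s > dim then dim - s else st
  acc ++ [st]

-- one axis of A (the Python repeats this block verbatim for h and for w; ported once, applied twice)
def pvAxisA (dim s : Int) : List Int :=
  let n := PySem.Int.floordiv dim s + 1
  if n > 1 then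
    -- int((n*s-dim)/(n-1)): at Dom's magnitudes (|numerator| ≤ |s| ≤ 2^31, 0 < |denominator| ≤ 2^31)
    -- Python's float division never rounds across an integer, so int(float /) is exactly
    -- truncating integer division, Int.tdiv.
    let ol := Int.tdiv (n * s - dim) (n - 1)
    let pos := (PySem.List.pyRange 1 n 1).foldl (pvBodyA dim s ol) [0]
    if pos.length == 2 && PySem.List.pyGetD pos 0 0 == PySem.List.pyGetD pos 1 0 then
      [PySem.List.pyGetD pos 0 0]
    else pos
  else [0]

def split_to_patches (h_ : Int) (w : Int) (s : Int) : List Int × List Int :=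
  (pvAxisA h_ s, pvAxisA w s)

-- ===== PORT B =====
def pvPositionsAlt (dim s : Int) : List Int :=
  let n := PySem.Int.floordiv dim s + 1
  if n ≤ 1 then [0]
  else
    let step := s - PySem.Int.floordiv (n * s - dim) (n - 1)
    let pos := 0 :: (PySem.List.pyRange 1 n 1).map (fun i => min (i * step) (dim - s))
    if pos.length == 2 && PySem.List.pyGetD pos 0 0 == PySem.List.pyGetD pos 1 0 then
      [PySem.List.pyGetD pos 0 0]
    else pos

def split_to_patches_alt (h_ : Int) (w : Int) (s : Int) : List Int × List Int :=
  (pvPositionsAlt h_ s, pvPositionsAlt w s)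

-- ===== PRECONDITION & SPEC =====
-- Pre_ excludes nonpositive patch size s: at s = 0 A raises ZeroDivisionError, and s < 0 is
-- outside the natural domain (a patch size), where A's int() truncation toward zero of a
-- negative float quotient is an implementation artefact that B (floor division) does not reproduce.
def Pre_split_to_patches (h_ : Int) (w : Int) (s : Int) : Prop := 1 ≤ s
instance (h_ : Int) (w : Int) (s : Int) : Decidable (Pre_split_to_patches h_ w s) := by
  unfold Pre_split_to_patches; infer_instance

def pvWitness_split_to_patches : Int × Int × Int := (5, 7, 2)

def Spec_split_to_patches (h_ : Int) (w : Int) (s : Int) (out : List Int × List Int) : Prop :=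
  out = split_to_patches_alt h_ w s
instance (h_ : Int) (w : Int) (s : Int) (out : List Int × List Int) :
    Decidable (Spec_split_to_patches h_ w s out) := by unfold Spec_split_to_patches; infer_instance

-- ===== CLAIM (what is proved, stated in full; the proofs are below) =====
def Claim_equal_split_to_patches : Prop :=
  ∀ (h_ : Int) (w : Int) (s : Int), Dom_split_to_patches h_ w s →
    Pre_split_to_patches h_ w s → Spec_split_to_patches h_ w s (split_to_patches h_ w s)

-- ===== LEMMAS AND PROOFS =====

lemma pvBodyA_append (dim s ol : Int) (pref : List Int) (v i : Int) :
    pvBodyA dim s ol (pref ++ [v]) i = (pref ++ [v]) ++ [min (v + (s - ol)) (dim - s)] := by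
  unfold pvBodyA
  rw [PySem.List.pyGetD_neg_one_append_singleton]
  have : (if v + s - ol + s > dim then dim - s else v + s - ol) = min (v + (s - ol)) (dim - s) := by
    rw [min_def]; split_ifs <;> omega
  simp only [this]

lemma pvStep_min (c m step : Int) (h0 : 0 ≤ step) :
    min (min c m + step) m = min (c + step) m := by omega

lemma pvFoldA (dim s ol : Int) (h0 : 0 ≤ s - ol) :
    ∀ (l : List Int) (pref : List Int) (c : Int),
      l.foldl (pvBodyA dim s ol) (pref ++ [min c (dim - s)]) =
        pref ++ (List.range (l.length + 1)).map
          (fun j : ℕ => min (c + (j : Int) * (s - ol)) (dim - s)) := by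
  intro l
  induction l with
  | nil =>
      intro pref c
      simp
  | cons x l ih =>
      intro pref c
      rw [List.foldl_cons, pvBodyA_append, pvStep_min c (dim - s) (s - ol) h0,
        ih (pref ++ [min c (dim - s)]) (c + (s - ol)), List.append_assoc]
      congr 1
      rw [List.length_cons]
      conv_rhs => rw [List.range_succ_eq_map]
      rw [List.map_cons, List.map_map, List.singleton_append]
      congr 1
      · norm_num
      · apply List.map_congr_left
        intro j _
        simp only [Function.comp_apply, Nat.succ_eq_add_one]
        congr 1
        push_cast
        ring

lemma pvAxis_eq (dim s : Int) (hs : 1 ≤ s) : pvAxisA dim s = pvPositionsAlt dim s := by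
  simp only [pvAxisA, pvPositionsAlt]
  set f := PySem.Int.floordiv dim s with hf
  by_cases hn : f + 1 > 1
  · rw [if_pos hn, if_neg (show ¬(f + 1 ≤ 1) by omega)]
    have hspos : (0 : Int) < s := by omega
    have hchar := (PySem.Int.floordiv_eq_iff_of_pos (a := dim) (b := s) (q := f) hspos).mp hf.symm
    have hfs : (1 : Int) * s ≤ f * s :=
      mul_le_mul_of_nonneg_right (show (1 : Int) ≤ f by omega) (by omega)
    have hdim : s ≤ dim := by nlinarith [hchar.1]
    have ha1 : 1 ≤ (f + 1) * s - dim := by nlinarith [hchar.2]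
    have ha2 : (f + 1) * s - dim ≤ s := by nlinarith [hchar.1]
    have htd : Int.tdiv ((f + 1) * s - dim) (f + 1 - 1)
        = PySem.Int.floordiv ((f + 1) * s - dim) (f + 1 - 1) := by
      rw [Int.tdiv_eq_ediv_of_nonneg (by omega),
        PySem.Int.floordiv_eq_ediv_of_pos (show (0:Int) < f + 1 - 1 by omega)]
    rw [htd]
    set ol := PySem.Int.floordiv ((f + 1) * s - dim) (f + 1 - 1) with hol
    have holnn : (0 : Int) ≤ ol := by
      rw [hol, PySem.Int.le_floordiv_iff_mul_le (show (0:Int) < f + 1 - 1 by omega)]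
      nlinarith
    have hols : ol ≤ s := by
      have : ol < s + 1 := by
        rw [hol, PySem.Int.floordiv_lt_iff_lt_mul (show (0:Int) < f + 1 - 1 by omega)]
        nlinarith
      omega
    have hstep : (0 : Int) ≤ s - ol := by omega
    have hlists :
        (PySem.List.pyRange 1 (f + 1) 1).foldl (pvBodyA dim s ol) [0] =
          0 :: (PySem.List.pyRange 1 (f + 1) 1).map (fun i => min (i * (s - ol)) (dim - s)) := by
      have h00 : ([0] : List Int) = [] ++ [min 0 (dim - s)] := by
        rw [List.nil_append, min_eq_left (by omega)]
      rw [h00, pvFoldA dim s ol hstep _ [] 0, List.nil_append,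
        PySem.List.pyRange_one 1 (f + 1), List.length_map,
        List.range_succ_eq_map, List.map_cons, List.map_map, List.map_map]
      simp only [Nat.cast_zero, zero_mul, zero_add, add_zero, List.length_range,
        min_eq_left (show (0:Int) ≤ dim - s by omega)]
      congr 1
      apply List.map_congr_left
      intro j _
      simp only [Function.comp_apply, Nat.succ_eq_add_one]
      congr 1
      push_cast
      ring
    rw [hlists]
  · rw [if_neg hn, if_pos (show f + 1 ≤ 1 by omega)]

-- ===== VERDICT (by name: the statement is the Claim_ definition above) =====
theorem split_to_patches_spec : Claim_equal_split_to_patches := by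
  intro h_ w s _ hpre
  unfold Spec_split_to_patches split_to_patches split_to_patches_alt
  rw [pvAxis_eq h_ s hpre, pvAxis_eq w s hpre]
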